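-- pv_equiv track=rewrite | github.com/bymars/topcoder | srm684/DivFreed2.py | count
-- ===== SOURCE A (Python) =====
-- modulo = 1000000007
--
-- def add(a, b):
--     a += b
--     if a >= modulo:
--         a -= modulo
--     return a
--
-- def count(n, k):
--     dp = [0] * n
--     for i in range(len(dp)):
--         dp[i] = [0] * (k + 1)
--     divid = [0] * (k + 1)
--     for i in range(k + 1):
--         divid[i] = []
--
--     for i in range(1, (k + 1) // 2 + 1):
--         j = 2 * i
--         while j <= k:
--             divid[j].append(i)
--             j += i
--     for i in range(1, k + 1):
--         dp[n - 1][i] = 1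
--     for p in range(n - 1)[::-1]:
--         sum = 0
--         for i in range(1, k + 1):
--             sum = add(sum, dp[p + 1][i])
--         for i in range(1, k + 1):
--             dp[p][i] = sum
--             for item in divid[i]:
--                 dp[p][i] -= dp[p + 1][item]
--             dp[p][i] = dp[p][i] % modulo
--     result = 0
--     for item in dp[0]:
--         result = add(result, item)
--     return result
-- ===== SOURCE B (Python) =====
-- modulo = 1000000007
--
--
-- def count(n, k):
--     # Inclusion-exclusion over runs of divisor violations: c[L-1] counts strict
--     # divisor chains of length L with values in 1..k; the answer is g[n] where
--     # g[t] = sum_{L>=1} (-1)**(L-1) * c[L-1] * g[t-L], g[0] = 1.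
--     w = [1] * k if k > 0 else []
--     c = []
--     t = 1
--     while t <= n and any(w):
--         c.append(sum(w) % modulo)
--         nxt = [0] * k
--         for d in range(1, k // 2 + 1):
--             for m in range(2 * d, k + 1, d):
--                 nxt[m - 1] += w[d - 1]
--         w = [x % modulo for x in nxt]
--         t += 1
--     g = [1]
--     for t in range(1, n + 1):
--         s = 0
--         for L in range(1, min(t, len(c)) + 1):
--             s += c[L - 1] * g[t - L] if L % 2 == 1 else -c[L - 1] * g[t - L]
--         g.append(s % modulo)
--     return g[n]
-- ===== Notes on version B (the rewrite author's own statement) =====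
-- stated objective: faster
-- what changed: B replaces the O(n*k log k) per-position DP by inclusion-exclusion over runs of divisor violations: it computes the (at most log2 k, capped by n) strict divisor-chain counts c[L] with one sieve pass per chain length, then runs a one-dimensional linear recurrence g[t] = sum (-1)^(L-1) c[L] g[t-L] of length n.
-- outside the precondition, e.g. on count(0, 5): A raises IndexError, B returns 1; on count(-1, 4): A raises IndexError, B returns 1
import Mathlib
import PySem

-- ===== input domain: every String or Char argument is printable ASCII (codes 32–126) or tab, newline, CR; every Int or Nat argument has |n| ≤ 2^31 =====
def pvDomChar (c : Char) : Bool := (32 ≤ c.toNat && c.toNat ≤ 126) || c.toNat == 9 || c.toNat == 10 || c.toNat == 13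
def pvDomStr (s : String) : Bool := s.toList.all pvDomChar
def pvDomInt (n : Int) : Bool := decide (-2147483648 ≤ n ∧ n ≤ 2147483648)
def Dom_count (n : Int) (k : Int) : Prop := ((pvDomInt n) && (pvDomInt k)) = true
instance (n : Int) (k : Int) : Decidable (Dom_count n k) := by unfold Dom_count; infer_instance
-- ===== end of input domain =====

-- B replaces the per-position DP by inclusion-exclusion over runs of divisor violations
-- (divisor-chain counts + a one-dimensional linear recurrence); measurably faster; equivalence
-- proved for n ≥ 1 (A raises IndexError for n ≤ 0).

-- ===== PORT A =====
def moduloA : Int := 1000000007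

-- add(a, b)
def addA (a b : Int) : Int :=
  let a := a + b
  if moduloA ≤ a then a - moduloA else a

-- inner 'while j <= k: divid[j].append(i); j += i' (guard 0 < i only for termination; every call has i ≥ 1)
def dividInner (k i j : Int) (divid : List (List Int)) : List (List Int) :=
  if h : j ≤ k ∧ 0 < i then
    dividInner k i (j + i)
      (PySem.List.pySetD divid j (PySem.List.pyGetD divid j [] ++ [i]))
  else divid
termination_by (k + 1 - j).toNat
decreasing_by omega

-- 'for i in range(1, (k+1)//2 + 1): j = 2*i; while …'
def dividBuild (k : Int) : List (List Int) :=
  (PySem.List.pyRange 1 (PySem.Int.floordiv (k+1) 2 + 1) 1).foldl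
    (fun divid i => dividInner k i (2*i) divid)
    (List.replicate (k+1).toNat ([] : List Int))

-- 'for i in range(1, k+1): dp[n-1][i] = 1'
def lastRowA (k : Int) (row : List Int) : List Int :=
  (PySem.List.pyRange 1 (k+1) 1).foldl (fun row i => PySem.List.pySetD row i 1) row

-- 'sum = 0; for i in range(1, k+1): sum = add(sum, dp[p+1][i])'
def sumRowA (k : Int) (prev : List Int) : Int :=
  (PySem.List.pyRange 1 (k+1) 1).foldl (fun s i => addA s (PySem.List.pyGetD prev i 0)) 0

-- 'for i in range(1, k+1): dp[p][i] = sum; for item in divid[i]: dp[p][i] -= dp[p+1][item]; dp[p][i] %= modulo'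
def newRowA (k : Int) (divid : List (List Int)) (prev base : List Int) : List Int :=
  let s := sumRowA k prev
  (PySem.List.pyRange 1 (k+1) 1).foldl (fun row i =>
    PySem.List.pySetD row i
      (PySem.Int.mod
        ((PySem.List.pyGetD divid i []).foldl
          (fun v item => v - PySem.List.pyGetD prev item 0) s)
        moduloA)) base

-- 'for p in range(n-1)[::-1]: …'  (range(...)[::-1] is the reversed range)
def mainFoldA (k : Int) (divid : List (List Int)) (dp : List (List Int)) (ps : List Int) : List (List Int) :=
  ps.foldl (fun dp p =>
    PySem.List.pySetD dp p
      (newRowA k divid (PySem.List.pyGetD dp (p+1) []) (PySem.List.pyGetD dp p []))) dp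

-- dp[n-1] access uses nonnegative n-1; exact for n ≥ 1 (Pre_count); Python raises IndexError for n ≤ 0
def count (n : Int) (k : Int) : Int :=
  let divid := dividBuild k
  let dp : List (List Int) := List.replicate n.toNat (List.replicate (k+1).toNat 0)
  let dp := PySem.List.pySetD dp (n-1) (lastRowA k (PySem.List.pyGetD dp (n-1) []))
  let dp := mainFoldA k divid dp ((PySem.List.pyRange 0 (n-1) 1).reverse)
  (PySem.List.pyGetD dp 0 []).foldl (fun r item => addA r item) 0

-- ===== PORT B =====
def moduloB : Int := 1000000007

-- one sieve pass: nxt[m-1] = (sum of w[d-1] over proper divisors d of m) % modulo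
def nextW (k : Int) (w : List Int) : List Int :=
  let nxt := (PySem.List.pyRange 1 (PySem.Int.floordiv k 2 + 1) 1).foldl (fun nxt d =>
      (PySem.List.pyRange (2*d) (k+1) d).foldl (fun nxt m =>
          PySem.List.pySetD nxt (m-1)
            (PySem.List.pyGetD nxt (m-1) 0 + PySem.List.pyGetD w (d-1) 0)) nxt)
    (List.replicate k.toNat 0)
  nxt.map (fun x => PySem.Int.mod x moduloB)

-- 'while t <= n and any(w): c.append(sum(w) % modulo); … ; t += 1'
def chainLoop (n k : Int) (t : Int) (w : List Int) (c : List Int) : List Int :=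
  if h : t ≤ n ∧ w.any (fun x => !(x == 0)) then
    chainLoop n k (t+1) (nextW k w) (c ++ [PySem.Int.mod w.sum moduloB])
  else c
termination_by (n + 1 - t).toNat
decreasing_by omega

-- 's = 0; for L in range(1, min(t, len(c)) + 1): s += c[L-1]*g[t-L] if L % 2 == 1 else -c[L-1]*g[t-L]'
def gStep (c g : List Int) (t : Int) : Int :=
  (PySem.List.pyRange 1 (min t (c.length : Int) + 1) 1).foldl
    (fun s L =>
      if PySem.Int.mod L 2 == 1 then
        s + PySem.List.pyGetD c (L-1) 0 * PySem.List.pyGetD g (t-L) 0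
      else
        s - PySem.List.pyGetD c (L-1) 0 * PySem.List.pyGetD g (t-L) 0) 0

def count_alt (n : Int) (k : Int) : Int :=
  let w := if 0 < k then List.replicate k.toNat (1 : Int) else []
  let c := chainLoop n k 1 w []
  let g := (PySem.List.pyRange 1 (n+1) 1).foldl
    (fun g t => g ++ [PySem.Int.mod (gStep c g t) moduloB]) [1]
  PySem.List.pyGetD g n 0

-- ===== PRECONDITION & SPEC =====
-- Pre_ excludes exactly n ≤ 0, where Python A raises IndexError (dp[n-1] / dp[0] on an empty dp)
def Pre_count (n : Int) (k : Int) : Prop := 1 ≤ n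
instance (n : Int) (k : Int) : Decidable (Pre_count n k) := by unfold Pre_count; infer_instance
def pvWitness_count : Int × Int := (3, 4)

def Spec_count (n : Int) (k : Int) (out : Int) : Prop := out = count_alt n k
instance (n : Int) (k : Int) (out : Int) : Decidable (Spec_count n k out) := by unfold Spec_count; infer_instance

-- ===== CLAIM (what is proved, stated in full; the proofs are below) =====
def Claim_equal_count : Prop := ∀ (n : Int) (k : Int), Dom_count n k → Pre_count n k → Spec_count n k (count n k)

-- ===== LEMMAS AND PROOFS =====

-- generic list extensionality via pyGetD
theorem eq_of_pyGetD (l1 l2 : List Int) (hlen : l1.length = l2.length)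
    (h : ∀ j : Int, 0 ≤ j → j < (l1.length : Int) → PySem.List.pyGetD l1 j 0 = PySem.List.pyGetD l2 j 0) :
    l1 = l2 := by
  apply List.ext_getElem hlen
  intro i h1 h2
  have hh := h i (by omega) (by exact_mod_cast h1)
  rw [PySem.List.pyGetD_eq_getElem _ _ (by omega) (by exact_mod_cast h1),
      PySem.List.pyGetD_eq_getElem _ _ (by omega) (by exact_mod_cast hlen ▸ h1)] at hh
  simpa using hh

theorem pyGetD_replicate {α : Type} (n : Nat) (x d : α) (j : Int) (h0 : 0 ≤ j) (h1 : j < (n : Int)) :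
    PySem.List.pyGetD (List.replicate n x) j d = x := by
  rw [PySem.List.pyGetD_eq_getElem _ _ h0 (by simpa using h1)]
  simp

theorem pyGetD_cons_pos {α : Type} (x : α) (c : List α) (i : Int) (d : α) (hi : 1 ≤ i) :
    PySem.List.pyGetD (x :: c) i d = PySem.List.pyGetD c (i - 1) d := by
  rw [PySem.List.pyGetD_of_nonneg _ _ (by omega), PySem.List.pyGetD_of_nonneg _ _ (by omega)]
  have h : i.toNat = (i - 1).toNat + 1 := by omega
  rw [h, List.getD_cons_succ]

theorem pyGetD_pySetD' {α : Type} (xs : List α) (p j : Int) (v d : α)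
    (hp : 0 ≤ p) (hplen : p < (xs.length : Int)) (hj : 0 ≤ j) :
    PySem.List.pyGetD (PySem.List.pySetD xs p v) j d = if j = p then v else PySem.List.pyGetD xs j d := by
  have hp' : p = ((p.toNat : Nat) : Int) := by omega
  have hj' : j = ((j.toNat : Nat) : Int) := by omega
  rw [hp', hj', PySem.List.pyGetD_pySetD_natCast xs p.toNat j.toNat v d (by omega)]
  split <;> split <;> first | rfl | omega

-- positive-step range: nil and cons unfoldings
theorem pyRange_pos_nil {a b s : Int} (hs : 0 < s) (h : b ≤ a) : PySem.List.pyRange a b s = [] := by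
  rw [PySem.List.pyRange_of_pos _ _ hs, if_neg (by omega)]
  simp

theorem pyRange_pos_cons {a b s : Int} (hs : 0 < s) (h : a < b) :
    PySem.List.pyRange a b s = a :: PySem.List.pyRange (a + s) b s := by
  rw [PySem.List.pyRange_of_pos _ _ hs, PySem.List.pyRange_of_pos _ _ hs, if_pos h]
  have e1 : b - a + s - 1 = (b - a - 1) + 1 * s := by ring
  rw [e1, Int.add_mul_ediv_right _ _ (by omega)]
  have h0 : 0 ≤ (b - a - 1) / s := Int.ediv_nonneg (by omega) (by omega)
  have e2 : ((b - a - 1) / s + 1).toNat = ((b - a - 1) / s).toNat + 1 := by omega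
  rw [e2, List.range_succ_eq_map]
  by_cases hab : a + s < b
  · rw [if_pos hab]
    have e3 : b - (a + s) + s - 1 = b - a - 1 := by ring
    rw [e3, List.map_cons, List.map_map]
    refine List.cons_eq_cons.mpr ⟨by simp, ?_⟩
    apply List.map_congr_left
    intro x _
    simp only [Function.comp_apply, Nat.succ_eq_add_one]
    push_cast
    ring
  · rw [if_neg hab]
    have : (b - a - 1) / s = 0 := Int.ediv_eq_zero_of_lt (by omega) (by omega)
    simp [this]

-- 'v -= g(item)' loop
theorem foldl_sub {α : Type} (l : List α) (g : α → Int) (s : Int) :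
    l.foldl (fun v item => v - g item) s = s - (l.map g).sum := by
  induction l generalizing s with
  | nil => simp
  | cons x t ih => simp only [List.foldl_cons, List.map_cons, List.sum_cons, ih]; ring

-- the repeated add(...) loop is a mod-sum
theorem addA_foldl (c : List Int) (acc : Int) (h0 : 0 ≤ acc) (h1 : acc < moduloA)
    (hr : ∀ x ∈ c, 0 ≤ x ∧ x < moduloA) :
    c.foldl addA acc = (acc + c.sum) % moduloA := by
  induction c generalizing acc with
  | nil => simp only [List.foldl_nil, List.sum_nil, add_zero]; simp only [moduloA] at *; omega
  | cons x t ih =>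
    have hx := hr x (by simp)
    have hax : addA acc x = (acc + x) % moduloA := by
      simp only [addA, moduloA] at *; split <;> omega
    simp only [List.foldl_cons, hax, List.sum_cons]
    rw [ih _ (by simp only [moduloA] at *; omega) (by simp only [moduloA] at *; omega)
        (fun y hy => hr y (by simp [hy]))]
    generalize t.sum = S
    simp only [moduloA]
    omega

-- scatter folds over (position, value) pairs
def subFold (l0 : List Int) (L : List (Int × Int)) : List Int :=
  L.foldl (fun l pv => PySem.List.pySetD l pv.1 (PySem.List.pyGetD l pv.1 0 - pv.2)) l0

def appFold (t0 : List (List Int)) (L : List (Int × Int)) : List (List Int) :=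
  L.foldl (fun t pv => PySem.List.pySetD t pv.1 (PySem.List.pyGetD t pv.1 [] ++ [pv.2])) t0

theorem subFold_length (L : List (Int × Int)) : ∀ l0, (subFold l0 L).length = l0.length := by
  induction L with
  | nil => intro l0; rfl
  | cons pv t ih => intro l0; rw [subFold, List.foldl_cons, ← subFold, ih, PySem.List.length_pySetD]

theorem subFold_getD (L : List (Int × Int)) : ∀ (l0 : List Int),
    (∀ pv ∈ L, 0 ≤ pv.1 ∧ pv.1 < (l0.length : Int)) → ∀ j : Int, 0 ≤ j →
    PySem.List.pyGetD (subFold l0 L) j 0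
      = PySem.List.pyGetD l0 j 0 - ((L.filter (fun pv => pv.1 == j)).map Prod.snd).sum := by
  induction L with
  | nil => intro l0 _ j hj; simp [subFold]
  | cons pv t ih =>
    intro l0 hb j hj
    have hpv := hb pv (by simp)
    rw [subFold, List.foldl_cons, ← subFold]
    rw [ih _ (fun q hq => by
          rw [PySem.List.length_pySetD]
          exact hb q (by simp [hq])) j hj]
    rw [pyGetD_pySetD' l0 pv.1 j _ 0 hpv.1 hpv.2 hj]
    rw [List.filter_cons]
    by_cases hc : j = pv.1
    · rw [if_pos hc, if_pos (by simp [hc])]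
      subst hc
      simp only [List.map_cons, List.sum_cons]
      ring
    · rw [if_neg hc, if_neg (by simp; omega)]

theorem appFold_getD (L : List (Int × Int)) : ∀ (t0 : List (List Int)),
    (∀ pv ∈ L, 0 ≤ pv.1 ∧ pv.1 < (t0.length : Int)) → ∀ j : Int, 0 ≤ j →
    PySem.List.pyGetD (appFold t0 L) j []
      = PySem.List.pyGetD t0 j [] ++ (L.filter (fun pv => pv.1 == j)).map Prod.snd := by
  induction L with
  | nil => intro t0 _ j hj; simp [appFold]
  | cons pv t ih =>
    intro t0 hb j hj
    have hpv := hb pv (by simp)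
    rw [appFold, List.foldl_cons, ← appFold]
    rw [ih _ (fun q hq => by
          rw [PySem.List.length_pySetD]
          exact hb q (by simp [hq])) j hj]
    rw [pyGetD_pySetD' t0 pv.1 j _ [] hpv.1 hpv.2 hj]
    rw [List.filter_cons]
    by_cases hc : j = pv.1
    · rw [if_pos hc, if_pos (by simp [hc])]
      subst hc
      simp
    · rw [if_neg hc, if_neg (by simp; omega)]

theorem subFold_append (l0 : List Int) (L1 L2 : List (Int × Int)) :
    subFold l0 (L1 ++ L2) = subFold (subFold l0 L1) L2 := List.foldl_append

theorem appFold_append (t0 : List (List Int)) (L1 L2 : List (Int × Int)) :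
    appFold t0 (L1 ++ L2) = appFold (appFold t0 L1) L2 := List.foldl_append

theorem foldl_subFold_flatMap (ds : List Int) (g : Int → List (Int × Int)) : ∀ l,
    ds.foldl (fun acc d => subFold acc (g d)) l = subFold l (ds.flatMap g) := by
  induction ds with
  | nil => intro l; rfl
  | cons d t ih => intro l; rw [List.foldl_cons, ih, List.flatMap_cons, subFold_append]

theorem foldl_appFold_flatMap (ds : List Int) (g : Int → List (Int × Int)) : ∀ t,
    ds.foldl (fun acc d => appFold acc (g d)) t = appFold t (ds.flatMap g) := by
  induction ds with
  | nil => intro t; rfl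
  | cons d t ih => intro l; rw [List.foldl_cons, ih, List.flatMap_cons, appFold_append]

-- flattened (position, value) pairs of A's divid-building sieve and of a value-scatter sieve
def pairsD (k : Int) : List (Int × Int) :=
  (PySem.List.pyRange 1 (PySem.Int.floordiv (k+1) 2 + 1) 1).flatMap
    (fun d => (PySem.List.pyRange (2*d) (k+1) d).map (fun m => (m, d)))

def pairsB (k : Int) (cur : List Int) : List (Int × Int) :=
  (PySem.List.pyRange 1 (k+1) 1).flatMap
    (fun d => (PySem.List.pyRange (2*d) (k+1) d).map (fun m => (m - 1, PySem.List.pyGetD cur (d-1) 0)))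

theorem dividInner_eq (k i j : Int) (t : List (List Int)) (hi : 0 < i) :
    dividInner k i j t = appFold t ((PySem.List.pyRange j (k+1) i).map (fun m => (m, i))) := by
  rw [dividInner]
  split
  · rename_i hcase
    conv_rhs => rw [pyRange_pos_cons hi (by omega), List.map_cons]
    rw [show appFold t ((j, i) :: (PySem.List.pyRange (j+i) (k+1) i).map (fun m => (m, i)))
          = appFold (PySem.List.pySetD t j (PySem.List.pyGetD t j [] ++ [i]))
              ((PySem.List.pyRange (j+i) (k+1) i).map (fun m => (m, i))) from rfl]
    exact dividInner_eq k i (j + i) _ hi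
  · rename_i hcase
    rw [pyRange_pos_nil hi (by omega)]
    rfl
termination_by (k + 1 - j).toNat
decreasing_by omega

theorem dividBuild_eq (k : Int) :
    dividBuild k = appFold (List.replicate (k+1).toNat ([] : List Int)) (pairsD k) := by
  rw [dividBuild, pairsD, ← foldl_appFold_flatMap]
  apply PySem.List.foldl_congr_mem
  intro acc d hd
  have hd1 : 1 ≤ d := (PySem.List.mem_pyRange_one.mp hd).1
  exact dividInner_eq k d (2*d) acc (by omega)

theorem pairsD_bounds (k : Int) (pv : Int × Int) (h : pv ∈ pairsD k) :
    0 ≤ pv.1 ∧ pv.1 ≤ k ∧ 1 ≤ pv.2 := by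
  rw [pairsD, List.mem_flatMap] at h
  obtain ⟨d, hd, hpv⟩ := h
  have hd1 : 1 ≤ d := (PySem.List.mem_pyRange_one.mp hd).1
  rw [List.mem_map] at hpv
  obtain ⟨m, hm, rfl⟩ := hpv
  have := (PySem.List.mem_pyRange_iff_of_pos (by omega) m).mp hm
  exact ⟨by omega, by omega, by omega⟩

theorem divid_getD (k m : Int) (hk : 0 ≤ k) (hm0 : 0 ≤ m) :
    PySem.List.pyGetD (dividBuild k) m []
      = ((pairsD k).filter (fun pv => pv.1 == m)).map Prod.snd := by
  rw [dividBuild_eq]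
  rw [appFold_getD (pairsD k) _ (fun pv hpv => by
        have := pairsD_bounds k pv hpv
        rw [List.length_replicate]
        omega) m hm0]
  have hbase : PySem.List.pyGetD (List.replicate (k+1).toNat ([] : List Int)) m [] = [] := by
    rw [PySem.List.pyGetD_of_nonneg _ _ hm0]
    rcases Nat.lt_or_ge m.toNat (k+1).toNat with h | h
    · rw [List.getD_replicate _ h]
    · rw [List.getD_eq_getElem?_getD, List.getElem?_eq_none (by simpa using h)]
      rfl
  rw [hbase, List.nil_append]

theorem sum_flatMap_int {α : Type} (l : List α) (g : α → List Int) :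
    (l.flatMap g).sum = (l.map (fun d => (g d).sum)).sum := by
  induction l with
  | nil => rfl
  | cons x t ih => simp [ih]

-- the two sieves subtract the same total from corresponding entries
theorem sums_eq (k m : Int) (c : List Int) (hk : 0 ≤ k) (hm1 : 1 ≤ m) :
    (((pairsD k).filter (fun pv => pv.1 == m)).map (fun pv => PySem.List.pyGetD (0 :: c) pv.2 0)).sum
      = (((pairsB k c).filter (fun pv => pv.1 == m - 1)).map Prod.snd).sum := by
  have hflt : PySem.Int.floordiv (k+1) 2 = (k+1)/2 := PySem.Int.floordiv_eq_ediv_of_pos (by omega)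
  have hsplit : PySem.List.pyRange 1 (k+1) 1
      = PySem.List.pyRange 1 (PySem.Int.floordiv (k+1) 2 + 1) 1
          ++ PySem.List.pyRange (PySem.Int.floordiv (k+1) 2 + 1) (k+1) 1 :=
    PySem.List.pyRange_one_append _ _ _ (by rw [hflt]; omega) (by rw [hflt]; omega)
  have hext : pairsB k c = (PySem.List.pyRange 1 (PySem.Int.floordiv (k+1) 2 + 1) 1).flatMap
      (fun d => (PySem.List.pyRange (2*d) (k+1) d).map (fun m' => (m' - 1, PySem.List.pyGetD c (d-1) 0))) := by
    rw [pairsB, hsplit, List.flatMap_append]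
    have hnil : (PySem.List.pyRange (PySem.Int.floordiv (k+1) 2 + 1) (k+1) 1).flatMap
        (fun d => (PySem.List.pyRange (2*d) (k+1) d).map (fun m' => (m' - 1, PySem.List.pyGetD c (d-1) 0))) = [] := by
      rw [List.flatMap_eq_nil_iff]
      intro d hd
      have hd' := PySem.List.mem_pyRange_one.mp hd
      rw [hflt] at hd'
      rw [pyRange_pos_nil (by omega) (by omega)]
      rfl
    rw [hnil, List.append_nil]
  rw [hext, pairsD]
  rw [List.filter_flatMap, List.filter_flatMap, List.map_flatMap, List.map_flatMap,
      sum_flatMap_int, sum_flatMap_int]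
  apply congrArg List.sum
  apply List.map_congr_left
  intro d hd
  have hd1 : 1 ≤ d := (PySem.List.mem_pyRange_one.mp hd).1
  rw [List.filter_map, List.filter_map, List.map_map, List.map_map]
  have hpA : ∀ x ∈ PySem.List.pyRange (2*d) (k+1) d,
      ((fun pv => pv.1 == m) ∘ (fun m' => (m', d))) x = (x == m) := by
    intro x _; simp
  have hpB : ∀ x ∈ PySem.List.pyRange (2*d) (k+1) d,
      ((fun pv => pv.1 == m - 1) ∘ (fun m' => (m' - 1, PySem.List.pyGetD c (d-1) 0))) x = (x == m) := by
    intro x _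
    show ((x - 1 : Int) == m - 1) = (x == m)
    by_cases hxm : x = m
    · subst hxm; simp
    · simp [hxm, sub_left_inj]
  rw [List.filter_congr hpA, List.filter_congr hpB]
  have hvA : ∀ x ∈ (PySem.List.pyRange (2*d) (k+1) d).filter (fun x => x == m),
      ((fun pv => PySem.List.pyGetD (0 :: c) pv.2 0) ∘ (fun m' => (m', d))) x
        = PySem.List.pyGetD c (d-1) 0 := by
    intro x _
    simp only [Function.comp_apply]
    exact pyGetD_cons_pos 0 c d 0 hd1
  have hvB : ∀ x ∈ (PySem.List.pyRange (2*d) (k+1) d).filter (fun x => x == m),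
      (Prod.snd ∘ (fun m' => (m' - 1, PySem.List.pyGetD c (d-1) 0))) x
        = PySem.List.pyGetD c (d-1) 0 := by
    intro x _; rfl
  rw [List.map_congr_left hvA, List.map_congr_left hvB]

theorem pairsB_bounds (k : Int) (c : List Int) (pv : Int × Int) (h : pv ∈ pairsB k c) :
    1 ≤ pv.1 ∧ pv.1 ≤ k - 1 := by
  rw [pairsB, List.mem_flatMap] at h
  obtain ⟨d, hd, hpv⟩ := h
  have hd1 : 1 ≤ d := (PySem.List.mem_pyRange_one.mp hd).1
  rw [List.mem_map] at hpv
  obtain ⟨m, hm, rfl⟩ := hpv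
  have := (PySem.List.mem_pyRange_iff_of_pos (by omega) m).mp hm
  exact ⟨by omega, by omega⟩

-- 'for i in range(a,b): row[i] = g(i)' characterised pointwise
def setRange (g : Int → Int) (a b : Int) (l : List Int) : List Int :=
  (PySem.List.pyRange a b 1).foldl (fun row i => PySem.List.pySetD row i (g i)) l

theorem setRange_length (g : Int → Int) (a b : Int) (l : List Int) :
    (setRange g a b l).length = l.length := by
  rw [setRange]
  generalize PySem.List.pyRange a b 1 = ps
  induction ps generalizing l with
  | nil => rfl
  | cons p t ih => rw [List.foldl_cons, ih, PySem.List.length_pySetD]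

theorem setRange_getD (g : Int → Int) (a b : Int) (l : List Int)
    (ha : 0 ≤ a) (hb : b ≤ (l.length : Int)) (j : Int) (hj : 0 ≤ j) :
    PySem.List.pyGetD (setRange g a b l) j 0
      = if a ≤ j ∧ j < b then g j else PySem.List.pyGetD l j 0 := by
  rcases le_or_gt b a with hba | hab
  · rw [setRange, PySem.List.pyRange_one_eq_nil hba, List.foldl_nil, if_neg (by omega)]
  · have hstep : setRange g a b l
        = setRange g (a+1) b (PySem.List.pySetD l a (g a)) := by
      rw [setRange, setRange, PySem.List.pyRange_one_cons hab, List.foldl_cons]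
    rw [hstep, setRange_getD g (a+1) b _ (by omega) (by rw [PySem.List.length_pySetD]; exact hb) j hj]
    by_cases hja : j = a
    · subst hja
      rw [if_neg (by omega), if_pos (by omega)]
      rw [pyGetD_pySetD' l j j (g j) 0 ha (by omega) hj, if_pos rfl]
    · rw [pyGetD_pySetD' l a j (g a) 0 ha (by omega) hj, if_neg hja]
      by_cases hcond : a ≤ j ∧ j < b
      · rcases lt_or_ge a j with h1 | h1
        · rw [if_pos (by omega), if_pos (by omega)]
        · omega
      · rw [if_neg (by omega), if_neg hcond]
termination_by (b - a).toNat
decreasing_by omega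

theorem lastRowA_eq (k : Int) (hk : 0 ≤ k) :
    lastRowA k (List.replicate (k+1).toNat 0) = 0 :: List.replicate k.toNat 1 := by
  have hshow : lastRowA k (List.replicate (k+1).toNat 0)
      = setRange (fun _ => 1) 1 (k+1) (List.replicate (k+1).toNat 0) := rfl
  rw [hshow]
  apply eq_of_pyGetD
  · rw [setRange_length, List.length_replicate, List.length_cons, List.length_replicate]
    omega
  · intro j hj hjlen
    rw [setRange_length, List.length_replicate] at hjlen
    rw [setRange_getD _ _ _ _ (by omega) (by rw [List.length_replicate]; omega) j hj]
    by_cases hj1 : 1 ≤ j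
    · rw [if_pos (by omega), pyGetD_cons_pos _ _ _ _ hj1, pyGetD_replicate _ _ _ _ (by omega) (by omega)]
    · have hj0 : j = 0 := by omega
      subst hj0
      rw [if_neg (by omega), pyGetD_replicate _ _ _ _ (by omega) (by omega),
          PySem.List.pyGetD_zero_cons]

-- the mathematical per-position step of A's DP, on the un-padded row (proof model of A's loop body)
def countStep (k : Int) (cur : List Int) : List Int :=
  let total := PySem.Int.mod cur.sum 1000000007
  let nxt := (PySem.List.pyRange 1 (k+1) 1).foldl (fun nxt d =>
      (PySem.List.pyRange (2*d) (k+1) d).foldl (fun nxt m =>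
          PySem.List.pySetD nxt (m-1)
            (PySem.List.pyGetD nxt (m-1) 0 - PySem.List.pyGetD cur (d-1) 0)) nxt)
    (List.replicate k.toNat total)
  nxt.map (fun x => PySem.Int.mod x 1000000007)

theorem countStep_eq (k : Int) (c : List Int) :
    countStep k c = (subFold (List.replicate k.toNat (PySem.Int.mod c.sum 1000000007)) (pairsB k c)).map
      (fun x => PySem.Int.mod x 1000000007) := by
  simp only [countStep]
  apply congrArg (List.map _)
  rw [pairsB, ← foldl_subFold_flatMap]
  apply PySem.List.foldl_congr_mem
  intro acc d hd
  rw [subFold, List.foldl_map]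

theorem countStep_length (k : Int) (c : List Int) : (countStep k c).length = k.toNat := by
  rw [countStep_eq, List.length_map, subFold_length, List.length_replicate]

theorem countStep_getD (k : Int) (c : List Int) (hk : 0 ≤ k) (j : Int) (h1 : 1 ≤ j) (hjk : j ≤ k) :
    PySem.List.pyGetD (countStep k c) (j-1) 0
      = PySem.Int.mod ((PySem.Int.mod c.sum 1000000007)
          - (((pairsB k c).filter (fun pv => pv.1 == j - 1)).map Prod.snd).sum) 1000000007 := by
  rw [countStep_eq]
  have hmap := PySem.List.pyGetD_map (fun x => PySem.Int.mod x 1000000007)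
    (subFold (List.replicate k.toNat (PySem.Int.mod c.sum 1000000007)) (pairsB k c)) (j-1) 0
  rw [show PySem.Int.mod 0 1000000007 = 0 from by decide] at hmap
  rw [hmap]
  rw [subFold_getD (pairsB k c) _ (fun pv hpv => by
        have := pairsB_bounds k c pv hpv
        rw [List.length_replicate]
        omega) (j-1) (by omega)]
  rw [pyGetD_replicate _ _ _ _ (by omega) (by omega)]

theorem sumRowA_eq (k : Int) (c : List Int) (hk : 0 ≤ k) (hc : c.length = k.toNat) :
    sumRowA k (0 :: c) = c.foldl addA 0 := by
  rw [sumRowA]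
  have hlen : (k + 1) = (((0 :: c).length : Nat) : Int) := by
    rw [List.length_cons, hc]; omega
  rw [hlen, PySem.List.foldl_pyRange_pyGetD' (0 :: c) 0 addA 0 (by omega)]
  simp

-- A's step equals the model step through the 0-padded row
theorem step_rel (k : Int) (hk : 0 ≤ k) (c : List Int) (hc : c.length = k.toNat)
    (hr : ∀ x ∈ c, 0 ≤ x ∧ x < moduloA) :
    newRowA k (dividBuild k) (0 :: c) (List.replicate (k+1).toNat 0) = 0 :: countStep k c := by
  have hshow : newRowA k (dividBuild k) (0 :: c) (List.replicate (k+1).toNat 0)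
      = setRange (fun i => PySem.Int.mod
          ((PySem.List.pyGetD (dividBuild k) i []).foldl
            (fun v item => v - PySem.List.pyGetD (0 :: c) item 0) (sumRowA k (0 :: c))) moduloA)
          1 (k+1) (List.replicate (k+1).toNat 0) := rfl
  rw [hshow]
  apply eq_of_pyGetD
  · rw [setRange_length, List.length_replicate, List.length_cons, countStep_length]; omega
  · intro j hj hjlen
    rw [setRange_length, List.length_replicate] at hjlen
    rw [setRange_getD _ _ _ _ (by omega) (by rw [List.length_replicate]; omega) j hj]
    by_cases hj1 : 1 ≤ j
    · rw [if_pos (by omega)]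
      rw [divid_getD k j hk hj, foldl_sub, List.map_map]
      rw [sumRowA_eq k c hk hc, addA_foldl c 0 (by norm_num [moduloA]) (by norm_num [moduloA]) hr]
      rw [pyGetD_cons_pos _ _ _ _ hj1, countStep_getD k c hk j hj1 (by omega)]
      have hcomp : ((fun item => PySem.List.pyGetD (0 :: c) item 0) ∘ Prod.snd)
          = (fun pv : Int × Int => PySem.List.pyGetD (0 :: c) pv.2 0) := rfl
      rw [hcomp, sums_eq k j c hk hj1]
      simp only [moduloA, PySem.Int.mod_eq_emod_of_pos (by norm_num : (0:Int) < 1000000007), zero_add]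
    · rw [if_neg (by omega)]
      have hj0 : j = 0 := by omega
      subst hj0
      rw [pyGetD_replicate _ _ _ _ (by omega) (by omega), PySem.List.pyGetD_zero_cons]

theorem curB_inv (k : Int) (hk : 0 ≤ k) (t : Nat) :
    ((countStep k)^[t] (List.replicate k.toNat 1)).length = k.toNat ∧
    (∀ x ∈ (countStep k)^[t] (List.replicate k.toNat 1), 0 ≤ x ∧ x < moduloA) := by
  induction t with
  | zero =>
    refine ⟨by simp, ?_⟩
    intro x hx
    rw [Function.iterate_zero_apply] at hx
    rw [List.eq_of_mem_replicate hx]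
    norm_num [moduloA]
  | succ t ih =>
    rw [Function.iterate_succ_apply']
    refine ⟨countStep_length _ _, ?_⟩
    intro x hx
    rw [countStep_eq, List.mem_map] at hx
    obtain ⟨y, _, rfl⟩ := hx
    exact ⟨PySem.Int.mod_nonneg y (by norm_num [moduloA]),
           PySem.Int.mod_lt y (by norm_num [moduloA])⟩

theorem iter_rel (k : Int) (hk : 0 ≤ k) (t : Nat) :
    (fun r => newRowA k (dividBuild k) r (List.replicate (k+1).toNat 0))^[t] (0 :: List.replicate k.toNat 1)
      = 0 :: (countStep k)^[t] (List.replicate k.toNat 1) := by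
  induction t with
  | zero => rfl
  | succ t ih =>
    rw [Function.iterate_succ_apply', Function.iterate_succ_apply', ih]
    exact step_rel k hk _ (curB_inv k hk t).1 (curB_inv k hk t).2

-- invariant of A's backwards loop over positions
theorem mainFold_inv (k : Int) (divid : List (List Int)) (z : List Int) : ∀ (m : Nat) (dp : List (List Int)) (R : List Int),
    m < dp.length →
    PySem.List.pyGetD dp (m : Int) [] = R →
    (∀ p : Nat, p < m → PySem.List.pyGetD dp (p : Int) [] = z) →
    PySem.List.pyGetD (mainFoldA k divid dp ((PySem.List.pyRange 0 (m : Int) 1).reverse)) 0 []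
      = (fun r => newRowA k divid r z)^[m] R := by
  intro m
  induction m with
  | zero =>
    intro dp R hlen htop hz
    rw [show ((0:Nat):Int) = 0 from rfl, PySem.List.pyRange_one_eq_nil (by omega), List.reverse_nil]
    simpa using htop
  | succ m ih =>
    intro dp R hlen htop hz
    have hcast : ((m+1 : Nat) : Int) = (m : Int) + 1 := by push_cast; ring
    rw [hcast, PySem.List.pyRange_one_succ_right (by positivity), List.reverse_append]
    simp only [List.reverse_cons, List.reverse_nil, List.nil_append, List.singleton_append]
    have hz0 : PySem.List.pyGetD dp ((m:Int)) [] = z := hz m (by omega)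
    have htop' : PySem.List.pyGetD dp ((m:Int) + 1) [] = R := by rw [← hcast]; exact htop
    have hstep : mainFoldA k divid dp ((m:Int) :: (PySem.List.pyRange 0 (m:Int) 1).reverse)
        = mainFoldA k divid
            (PySem.List.pySetD dp (m:Int)
              (newRowA k divid (PySem.List.pyGetD dp ((m:Int)+1) []) (PySem.List.pyGetD dp (m:Int) [])))
            ((PySem.List.pyRange 0 (m:Int) 1).reverse) := rfl
    rw [hstep, htop', hz0]
    rw [ih (PySem.List.pySetD dp (m:Int) (newRowA k divid R z)) (newRowA k divid R z)
          (by rw [PySem.List.length_pySetD]; omega)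
          (by rw [pyGetD_pySetD' dp (m:Int) (m:Int) _ [] (by omega) (by exact_mod_cast by omega) (by omega)]
              simp)
          (fun p hp => by
            rw [pyGetD_pySetD' dp (m:Int) (p:Int) _ [] (by omega) (by exact_mod_cast by omega) (by omega)]
            rw [if_neg (by exact_mod_cast by omega)]
            exact hz p (by omega))]
    rw [← Function.iterate_succ_apply]

-- A's result is the mod-reduced total of the iterated model step
theorem countA_eq (n k : Int) (hn : 1 ≤ n) :
    count n k
      = PySem.Int.mod ((countStep k)^[(n-1).toNat] (List.replicate k.toNat 1)).sum 1000000007 := by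
  simp only [count]
  have hdp0 : PySem.List.pyGetD (List.replicate n.toNat (List.replicate (k+1).toNat (0:Int))) (n-1) []
      = List.replicate (k+1).toNat 0 := pyGetD_replicate _ _ _ _ (by omega) (by omega)
  rw [hdp0]
  have hcastm : (n - 1) = (((n-1).toNat : Nat) : Int) := by omega
  rw [hcastm]
  rw [mainFold_inv k (dividBuild k) (List.replicate (k+1).toNat 0) (n-1).toNat _
        (lastRowA k (List.replicate (k+1).toNat 0))
        (by rw [PySem.List.length_pySetD, List.length_replicate]; omega)
        (by rw [pyGetD_pySetD' _ _ _ _ [] (by omega) (by rw [List.length_replicate]; omega) (by omega)]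
            simp)
        (fun p hp => by
          rw [pyGetD_pySetD' _ _ _ _ [] (by omega) (by rw [List.length_replicate]; omega) (by omega)]
          rw [if_neg (by exact_mod_cast by omega)]
          exact pyGetD_replicate _ _ _ _ (by omega) (by omega))]
  rcases le_or_gt 0 k with hk | hk
  · rw [lastRowA_eq k hk, iter_rel k hk]
    rw [List.foldl_cons, show addA 0 0 = 0 from by decide]
    rw [addA_foldl _ 0 (by norm_num [moduloA]) (by norm_num [moduloA]) (curB_inv k hk _).2]
    rw [PySem.Int.mod_eq_emod_of_pos (by norm_num : (0:Int) < 1000000007)]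
    simp only [moduloA, zero_add, Int.toNat_natCast]
  · rw [← hcastm]
    have hnil : List.replicate (k+1).toNat (0:Int) = [] := by
      rw [show (k+1).toNat = 0 from by omega, List.replicate_zero]
    have hlast : lastRowA k (List.replicate (k+1).toNat 0) = List.replicate (k+1).toNat 0 := by
      rw [lastRowA, PySem.List.pyRange_one_eq_nil (by omega), List.foldl_nil]
    have hfix : ∀ r, newRowA k (dividBuild k) r (List.replicate (k+1).toNat 0)
        = List.replicate (k+1).toNat 0 := by
      intro r
      rw [newRowA, PySem.List.pyRange_one_eq_nil (by omega), List.foldl_nil]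
    have hiterA : (fun r => newRowA k (dividBuild k) r (List.replicate (k+1).toNat 0))^[(n-1).toNat]
        (lastRowA k (List.replicate (k+1).toNat 0)) = List.replicate (k+1).toNat 0 := by
      rw [hlast]
      exact Function.iterate_fixed
        (f := fun r => newRowA k (dividBuild k) r (List.replicate (k+1).toNat 0))
        (x := List.replicate (k+1).toNat 0) (hfix _) _
    rw [hiterA, hnil, List.foldl_nil]
    have hinit : List.replicate k.toNat (1:Int) = [] := by
      rw [show k.toNat = 0 from by omega, List.replicate_zero]
    have hstepnil : countStep k ([] : List Int) = [] := by
      have := countStep_length k ([] : List Int)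
      rw [show k.toNat = 0 from by omega] at this
      exact List.length_eq_zero_iff.mp this
    rw [hinit, Function.iterate_fixed (f := countStep k) (x := ([] : List Int)) hstepnil _]
    decide

-- ===== the ZMod model: transfer operator, divisor-chain counts, inclusion-exclusion recurrence =====

def onefM : ℤ → ZMod 1000000007 := fun _ => 1

def totM (k : Int) (v : ℤ → ZMod 1000000007) : ZMod 1000000007 :=
  ∑ i ∈ Finset.range k.toNat, v ((i : ℤ) + 1)

def DapM (k : Int) (v : ℤ → ZMod 1000000007) : ℤ → ZMod 1000000007 :=
  fun m => ∑ i ∈ Finset.range k.toNat,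
    if ((i : ℤ) + 1) ∣ m ∧ 2 * ((i : ℤ) + 1) ≤ m then v ((i : ℤ) + 1) else 0

def stepMM (k : Int) (v : ℤ → ZMod 1000000007) : ℤ → ZMod 1000000007 :=
  fun m => totM k v - DapM k v m

def cLM (k : Int) (j : ℕ) : ZMod 1000000007 := totM k ((DapM k)^[j] onefM)

def gMf (k : Int) : ℕ → ZMod 1000000007
  | 0 => 1
  | (t+1) => totM k ((stepMM k)^[t] onefM)

def coefM (k : Int) (t j : ℕ) : ZMod 1000000007 := (-1)^j * gMf k (t - j)

-- casts
def cvec (c : List Int) : ℤ → ZMod 1000000007 :=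
  fun m => ((PySem.List.pyGetD c (m-1) 0 : ℤ) : ZMod 1000000007)

theorem cast_pymod (x : ℤ) :
    ((PySem.Int.mod x 1000000007 : ℤ) : ZMod 1000000007) = (x : ZMod 1000000007) := by
  rw [PySem.Int.mod_eq_emod_of_pos (by norm_num), Int.emod_def]
  push_cast
  have h : (1000000007 : ZMod 1000000007) = 0 := by exact_mod_cast ZMod.natCast_self 1000000007
  rw [h]
  ring

theorem int_eq_of_cast (x y : ℤ) (hx : 0 ≤ x) (hx2 : x < 1000000007) (hy : 0 ≤ y) (hy2 : y < 1000000007)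
    (h : (x : ZMod 1000000007) = (y : ZMod 1000000007)) : x = y := by
  rw [ZMod.intCast_eq_intCast_iff] at h
  have h2 : x % (1000000007 : ℤ) = y % 1000000007 := h
  rw [Int.emod_eq_of_lt hx hx2, Int.emod_eq_of_lt hy hy2] at h2
  exact h2

theorem list_range_sum (n : ℕ) (f : ℕ → ZMod 1000000007) :
    ((List.range n).map f).sum = ∑ i ∈ Finset.range n, f i := rfl

theorem castZ_listsum (l : List Int) :
    ((l.sum : ℤ) : ZMod 1000000007) = (l.map (fun x : ℤ => (x : ZMod 1000000007))).sum := by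
  induction l with
  | nil => simp
  | cons x t ih =>
    rw [List.sum_cons, List.map_cons, List.sum_cons, Int.cast_add, ih]

theorem cast_listsum (c : List Int) :
    ((c.sum : ℤ) : ZMod 1000000007) = ∑ i ∈ Finset.range c.length, ((c.getD i 0 : ℤ) : ZMod 1000000007) := by
  induction c with
  | nil => simp
  | cons x t ih =>
    rw [List.sum_cons, List.length_cons, Finset.sum_range_succ']
    simp only [List.getD_cons_succ, List.getD_cons_zero]
    rw [Int.cast_add, ih]
    ring

theorem listsum_totM (k : Int) (c : List Int) (hlen : c.length = k.toNat) :
    ((c.sum : ℤ) : ZMod 1000000007) = totM k (cvec c) := by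
  rw [cast_listsum, hlen, totM]
  apply Finset.sum_congr rfl
  intro i _
  have hidx : ((i : ℤ) + 1) - 1 = ((i : ℕ) : ℤ) := by omega
  rw [cvec, hidx, PySem.List.pyGetD_natCast]

-- congruence / vanishing lemmas: the model only reads values at 1..k
theorem totM_congr (k : Int) (v v' : ℤ → ZMod 1000000007)
    (h : ∀ m, 1 ≤ m → m ≤ k → v m = v' m) : totM k v = totM k v' := by
  apply Finset.sum_congr rfl
  intro i hi
  rw [Finset.mem_range] at hi
  exact h _ (by omega) (by omega)

theorem DapM_congr (k : Int) (v v' : ℤ → ZMod 1000000007)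
    (h : ∀ m, 1 ≤ m → m ≤ k → v m = v' m) (m : ℤ) : DapM k v m = DapM k v' m := by
  apply Finset.sum_congr rfl
  intro i hi
  rw [Finset.mem_range] at hi
  rw [h _ (by omega) (by omega)]

theorem DapM_vanish (k : Int) (v : ℤ → ZMod 1000000007)
    (h : ∀ m, 1 ≤ m → m ≤ k → v m = 0) (m : ℤ) : DapM k v m = 0 := by
  apply Finset.sum_eq_zero
  intro i hi
  rw [Finset.mem_range] at hi
  rw [h _ (by omega) (by omega)]
  simp

theorem totM_vanish (k : Int) (v : ℤ → ZMod 1000000007)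
    (h : ∀ m, 1 ≤ m → m ≤ k → v m = 0) : totM k v = 0 := by
  apply Finset.sum_eq_zero
  intro i hi
  rw [Finset.mem_range] at hi
  exact h _ (by omega) (by omega)

-- linearity of the operator and the total over finite signed combinations
theorem DapM_sum (k : Int) (s : Finset ℕ) (a : ℕ → ZMod 1000000007)
    (f : ℕ → ℤ → ZMod 1000000007) (m : ℤ) :
    DapM k (fun y => ∑ j ∈ s, a j * f j y) m = ∑ j ∈ s, a j * DapM k (f j) m := by
  unfold DapM
  beta_reduce
  calc (∑ i ∈ Finset.range k.toNat,
          if ((i : ℤ) + 1) ∣ m ∧ 2 * ((i : ℤ) + 1) ≤ m then ∑ j ∈ s, a j * f j ((i : ℤ) + 1) else 0)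
      = ∑ i ∈ Finset.range k.toNat, ∑ j ∈ s,
          (if ((i : ℤ) + 1) ∣ m ∧ 2 * ((i : ℤ) + 1) ≤ m then a j * f j ((i : ℤ) + 1) else 0) := by
        apply Finset.sum_congr rfl
        intro i _
        split
        · rfl
        · exact Finset.sum_const_zero.symm
    _ = ∑ j ∈ s, ∑ i ∈ Finset.range k.toNat,
          (if ((i : ℤ) + 1) ∣ m ∧ 2 * ((i : ℤ) + 1) ≤ m then a j * f j ((i : ℤ) + 1) else 0) :=
        Finset.sum_comm
    _ = ∑ j ∈ s, a j * ∑ i ∈ Finset.range k.toNat,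
          (if ((i : ℤ) + 1) ∣ m ∧ 2 * ((i : ℤ) + 1) ≤ m then f j ((i : ℤ) + 1) else 0) := by
        apply Finset.sum_congr rfl
        intro j _
        rw [Finset.mul_sum]
        apply Finset.sum_congr rfl
        intro i _
        split <;> simp

theorem totM_sum (k : Int) (s : Finset ℕ) (a : ℕ → ZMod 1000000007)
    (f : ℕ → ℤ → ZMod 1000000007) :
    totM k (fun y => ∑ j ∈ s, a j * f j y) = ∑ j ∈ s, a j * totM k (f j) := by
  unfold totM
  beta_reduce
  rw [Finset.sum_comm]
  apply Finset.sum_congr rfl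
  intro j _
  rw [Finset.mul_sum]

-- the inclusion-exclusion expansion of the iterated transfer operator
theorem iterate_expand (k : Int) (t : ℕ) :
    (stepMM k)^[t] onefM
      = fun m => ∑ j ∈ Finset.range (t+1), coefM k t j * ((DapM k)^[j] onefM m) := by
  induction t with
  | zero =>
    funext m
    simp [coefM, gMf, onefM]
  | succ t ih =>
    funext m
    rw [Function.iterate_succ_apply']
    show totM k ((stepMM k)^[t] onefM) - DapM k ((stepMM k)^[t] onefM) m = _
    have hT : totM k ((stepMM k)^[t] onefM) = gMf k (t+1) := rfl
    have hD : DapM k ((stepMM k)^[t] onefM) m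
        = ∑ j ∈ Finset.range (t+1), coefM k t j * DapM k ((DapM k)^[j] onefM) m := by
      rw [ih]
      exact DapM_sum k (Finset.range (t+1)) (coefM k t) (fun j => (DapM k)^[j] onefM) m
    rw [hT, hD]
    conv_rhs => rw [Finset.sum_range_succ']
    have h0 : coefM k (t+1) 0 * (DapM k)^[0] onefM m = gMf k (t+1) := by
      simp [coefM, onefM]
    rw [h0]
    have hterm : ∀ j ∈ Finset.range (t+1),
        coefM k (t+1) (j+1) * (DapM k)^[j+1] onefM m
          = -(coefM k t j * DapM k ((DapM k)^[j] onefM) m) := by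
      intro j hj
      rw [Finset.mem_range] at hj
      have hsub : t + 1 - (j + 1) = t - j := by omega
      rw [coefM, coefM, hsub, pow_succ, Function.iterate_succ_apply']
      ring
    rw [Finset.sum_congr rfl hterm]
    rw [Finset.sum_neg_distrib]
    ring

theorem gM_rec (k : Int) (t : ℕ) :
    gMf k (t+1) = ∑ j ∈ Finset.range (t+1), coefM k t j * cLM k j := by
  show totM k ((stepMM k)^[t] onefM) = _
  rw [iterate_expand, totM_sum]
  rfl

-- cLM vanishes from any level where the chain vector vanishes on 1..k
theorem cLM_vanish (k : Int) (a : ℕ)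
    (h : ∀ m, 1 ≤ m → m ≤ k → (DapM k)^[a] onefM m = 0) :
    ∀ j, a ≤ j → cLM k j = 0 := by
  intro j hj
  have hvan : ∀ j, a ≤ j → ∀ m, 1 ≤ m → m ≤ k → (DapM k)^[j] onefM m = 0 := by
    intro j hj
    induction j, hj using Nat.le_induction with
    | base => exact h
    | succ j hj ih =>
      intro m hm1 hm2
      rw [Function.iterate_succ_apply']
      exact DapM_vanish k _ ih m
  exact totM_vanish k _ (hvan j hj)

-- ===== the sieve's (position, value) pairs sum to the operator, in ZMod =====

theorem filter_pyRange_beq (a b s m : Int) (hs : 0 < s) :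
    (PySem.List.pyRange a b s).filter (fun x => x == m)
      = if m ∈ PySem.List.pyRange a b s then [m] else [] := by
  rcases le_or_gt b a with hba | hab
  · rw [pyRange_pos_nil hs hba]
    simp
  · rw [pyRange_pos_cons hs hab, List.filter_cons, filter_pyRange_beq (a+s) b s m hs]
    by_cases hm : m ∈ PySem.List.pyRange (a+s) b s
    · have ham : a ≠ m := by
        obtain ⟨h1, h2, h3⟩ := (PySem.List.mem_pyRange_iff_of_pos hs m).mp hm
        omega
      simp [hm, ham]
    · by_cases ham : a = m
      · subst ham
        simp [hm]
      · have hma : m ≠ a := fun h => ham h.symm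
        simp [hm, ham, hma]
termination_by (b - a).toNat
decreasing_by omega

theorem pairsVal_filter_sum_cast (k m : Int) (val : Int → Int) (hm1 : 1 ≤ m) (hmk : m ≤ k) :
    (((((PySem.List.pyRange 1 (k+1) 1).flatMap
        (fun d => (PySem.List.pyRange (2*d) (k+1) d).map (fun m' => (m' - 1, val d)))).filter
          (fun pv => pv.1 == m - 1)).map Prod.snd).sum : ZMod 1000000007)
      = ∑ i ∈ Finset.range k.toNat,
          if ((i : ℤ) + 1) ∣ m ∧ 2 * ((i : ℤ) + 1) ≤ m then ((val ((i : ℤ) + 1) : ℤ) : ZMod 1000000007) else 0 := by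
  rw [List.filter_flatMap, List.map_flatMap, sum_flatMap_int]
  have hper : ∀ d ∈ PySem.List.pyRange 1 (k+1) 1,
      ((((PySem.List.pyRange (2*d) (k+1) d).map (fun m' => (m' - 1, val d))).filter
          (fun pv => pv.1 == m - 1)).map Prod.snd).sum
        = if d ∣ m ∧ 2*d ≤ m then val d else 0 := by
    intro d hd
    have hd1 : 1 ≤ d := (PySem.List.mem_pyRange_one.mp hd).1
    rw [List.filter_map, List.map_map]
    have hp : ∀ x ∈ PySem.List.pyRange (2*d) (k+1) d,
        ((fun pv => pv.1 == m - 1) ∘ (fun m' => (m' - 1, val d))) x = (x == m) := by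
      intro x _
      show ((x - 1 : Int) == m - 1) = (x == m)
      by_cases hxm : x = m
      · subst hxm; simp
      · simp [hxm, sub_left_inj]
    rw [List.filter_congr hp, filter_pyRange_beq _ _ _ _ (by omega)]
    have hmem : m ∈ PySem.List.pyRange (2*d) (k+1) d ↔ (d ∣ m ∧ 2*d ≤ m) := by
      rw [PySem.List.mem_pyRange_iff_of_pos (by omega)]
      have hdd : d ∣ 2*d := dvd_mul_left d 2
      constructor
      · rintro ⟨h1, h2, h3⟩
        refine ⟨?_, h1⟩
        have := dvd_add h3 hdd
        simpa using this
      · rintro ⟨h1, h2⟩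
        exact ⟨h2, by omega, dvd_sub h1 hdd⟩
    by_cases hc : d ∣ m ∧ 2*d ≤ m
    · rw [if_pos (hmem.mpr hc), if_pos hc]
      simp
    · rw [if_neg (fun hmm => hc (hmem.mp hmm)), if_neg hc]
      simp
  rw [List.map_congr_left hper]
  rw [castZ_listsum, List.map_map]
  rw [PySem.List.pyRange_one]
  rw [List.map_map]
  have hk0 : (k + 1 - 1).toNat = k.toNat := by omega
  rw [hk0, list_range_sum]
  apply Finset.sum_congr rfl
  intro i _
  simp only [Function.comp_apply]
  have hc : (1 + (i : ℤ)) = ((i : ℤ) + 1) := by ring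
  rw [hc]
  split <;> simp

-- B's scatter sieve as a subFold over negated (position, value) pairs
theorem nextW_eq (k : Int) (w : List Int) :
    nextW k w = (subFold (List.replicate k.toNat 0)
      ((PySem.List.pyRange 1 (PySem.Int.floordiv k 2 + 1) 1).flatMap
        (fun d => (PySem.List.pyRange (2*d) (k+1) d).map
          (fun m' => (m' - 1, -(PySem.List.pyGetD w (d-1) 0)))))).map
      (fun x => PySem.Int.mod x moduloB) := by
  simp only [nextW]
  apply congrArg (List.map _)
  rw [← foldl_subFold_flatMap]
  apply PySem.List.foldl_congr_mem
  intro acc d _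
  rw [subFold, List.foldl_map]
  simp only [sub_neg_eq_add]

theorem halfRange_ext (k : Int) (hk : 0 ≤ k) (val : Int → Int) :
    (PySem.List.pyRange 1 (PySem.Int.floordiv k 2 + 1) 1).flatMap
      (fun d => (PySem.List.pyRange (2*d) (k+1) d).map (fun m' => (m' - 1, val d)))
    = (PySem.List.pyRange 1 (k+1) 1).flatMap
      (fun d => (PySem.List.pyRange (2*d) (k+1) d).map (fun m' => (m' - 1, val d))) := by
  have hflt : PySem.Int.floordiv k 2 = k/2 := PySem.Int.floordiv_eq_ediv_of_pos (by omega)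
  have hsplit : PySem.List.pyRange 1 (k+1) 1
      = PySem.List.pyRange 1 (PySem.Int.floordiv k 2 + 1) 1
          ++ PySem.List.pyRange (PySem.Int.floordiv k 2 + 1) (k+1) 1 :=
    PySem.List.pyRange_one_append _ _ _ (by rw [hflt]; omega) (by rw [hflt]; omega)
  rw [hsplit, List.flatMap_append]
  have hnil : (PySem.List.pyRange (PySem.Int.floordiv k 2 + 1) (k+1) 1).flatMap
      (fun d => (PySem.List.pyRange (2*d) (k+1) d).map (fun m' => (m' - 1, val d))) = [] := by
    rw [List.flatMap_eq_nil_iff]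
    intro d hd
    have hd' := PySem.List.mem_pyRange_one.mp hd
    rw [hflt] at hd'
    rw [pyRange_pos_nil (by omega) (by omega)]
    rfl
  rw [hnil, List.append_nil]

theorem pairsVal_bounds (k : Int) (val : Int → Int) (pv : Int × Int)
    (h : pv ∈ (PySem.List.pyRange 1 (k+1) 1).flatMap
      (fun d => (PySem.List.pyRange (2*d) (k+1) d).map (fun m' => (m' - 1, val d)))) :
    1 ≤ pv.1 ∧ pv.1 ≤ k - 1 := by
  rw [List.mem_flatMap] at h
  obtain ⟨d, hd, hpv⟩ := h
  have hd1 : 1 ≤ d := (PySem.List.mem_pyRange_one.mp hd).1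
  rw [List.mem_map] at hpv
  obtain ⟨m, hm, rfl⟩ := hpv
  have := (PySem.List.mem_pyRange_iff_of_pos (by omega) m).mp hm
  exact ⟨by omega, by omega⟩

theorem nextW_length (k : Int) (w : List Int) : (nextW k w).length = k.toNat := by
  rw [nextW_eq, List.length_map, subFold_length, List.length_replicate]

-- B's sieve pass computes the operator applied to the cast vector
theorem nextW_getD (k : Int) (w : List Int) (hk : 1 ≤ k) (hlen : w.length = k.toNat)
    (m : Int) (hm1 : 1 ≤ m) (hmk : m ≤ k) :
    ((PySem.List.pyGetD (nextW k w) (m-1) 0 : ℤ) : ZMod 1000000007) = DapM k (cvec w) m := by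
  rw [nextW_eq, halfRange_ext k (by omega)]
  have hmap := PySem.List.pyGetD_map (fun x => PySem.Int.mod x moduloB)
    (subFold (List.replicate k.toNat 0)
      ((PySem.List.pyRange 1 (k+1) 1).flatMap
        (fun d => (PySem.List.pyRange (2*d) (k+1) d).map
          (fun m' => (m' - 1, -(PySem.List.pyGetD w (d-1) 0)))))) (m-1) 0
  rw [show PySem.Int.mod 0 moduloB = 0 from by decide] at hmap
  rw [hmap]
  rw [subFold_getD _ _ (fun pv hpv => by
        have := pairsVal_bounds k _ pv hpv
        rw [List.length_replicate]
        omega) (m-1) (by omega)]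
  rw [pyGetD_replicate _ _ _ _ (by omega) (by omega)]
  have hcast : ∀ x : ℤ, ((PySem.Int.mod x moduloB : ℤ) : ZMod 1000000007) = (x : ZMod 1000000007) := by
    intro x
    exact cast_pymod x
  rw [hcast, Int.cast_sub, Int.cast_zero]
  rw [pairsVal_filter_sum_cast k m (fun d => -(PySem.List.pyGetD w (d-1) 0)) hm1 hmk]
  rw [DapM, zero_sub, ← Finset.sum_neg_distrib]
  apply Finset.sum_congr rfl
  intro i _
  split
  · rw [Int.cast_neg, neg_neg]
    rfl
  · simp

theorem nextW_range (k : Int) (w : List Int) :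
    ∀ x ∈ nextW k w, 0 ≤ x ∧ x < 1000000007 := by
  intro x hx
  rw [nextW, List.mem_map] at hx
  obtain ⟨y, _, rfl⟩ := hx
  exact ⟨PySem.Int.mod_nonneg y (by norm_num [moduloB]),
         PySem.Int.mod_lt y (by norm_num [moduloB])⟩

-- snoc access helpers
theorem getD_snoc_lt (c : List Int) (x : Int) (j : ℕ) (h : j < c.length) :
    (c ++ [x]).getD j 0 = c.getD j 0 := by
  rw [List.getD_eq_getElem?_getD, List.getD_eq_getElem?_getD, List.getElem?_append_left h]

theorem getD_snoc_self (c : List Int) (x : Int) :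
    (c ++ [x]).getD c.length 0 = x := by
  rw [List.getD_eq_getElem?_getD, List.getElem?_append_right (le_refl _)]
  simp

-- A's model step corresponds to the ZMod transfer operator
theorem AInv (k : Int) (t : ℕ) :
    ∀ m, 1 ≤ m → m ≤ k →
      cvec ((countStep k)^[t] (List.replicate k.toNat 1)) m = (stepMM k)^[t] onefM m := by
  induction t with
  | zero =>
    intro m hm1 hmk
    rw [Function.iterate_zero_apply, Function.iterate_zero_apply]
    simp only [cvec]
    rw [pyGetD_replicate _ _ _ _ (by omega) (by omega)]
    simp [onefM]
  | succ t ih =>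
    intro m hm1 hmk
    rw [Function.iterate_succ_apply', Function.iterate_succ_apply']
    have hk0 : 0 ≤ k := by omega
    have hlen : ((countStep k)^[t] (List.replicate k.toNat 1)).length = k.toNat :=
      (curB_inv k hk0 t).1
    simp only [cvec]
    rw [countStep_getD k _ hk0 m hm1 hmk]
    rw [cast_pymod, Int.cast_sub, cast_pymod]
    rw [show pairsB k ((countStep k)^[t] (List.replicate k.toNat 1))
        = (PySem.List.pyRange 1 (k+1) 1).flatMap
            (fun d => (PySem.List.pyRange (2*d) (k+1) d).map
              (fun m' => (m' - 1, PySem.List.pyGetD ((countStep k)^[t] (List.replicate k.toNat 1)) (d-1) 0)))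
      from rfl]
    rw [pairsVal_filter_sum_cast k m _ hm1 hmk]
    rw [listsum_totM k _ hlen]
    show _ = totM k ((stepMM k)^[t] onefM) - DapM k ((stepMM k)^[t] onefM) m
    rw [totM_congr k _ _ ih]
    congr 1
    rw [← DapM_congr k _ _ ih m]
    rw [DapM]
    apply Finset.sum_congr rfl
    intro i _
    rfl

-- the chain loop: its output entries are the chain counts, and the missing ones vanish
theorem chainLoop_spec (n k : Int) : ∀ (fuel : ℕ) (t : Int) (w c : List Int),
    (n + 1 - t).toNat ≤ fuel →
    t = (c.length : ℤ) + 1 →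
    w.length = k.toNat →
    (∀ x ∈ w, 0 ≤ x ∧ x < 1000000007) →
    (∀ m, 1 ≤ m → m ≤ k → cvec w m = (DapM k)^[c.length] onefM m) →
    (∀ j : ℕ, j < c.length → ((c.getD j 0 : ℤ) : ZMod 1000000007) = cLM k j) →
    (∀ j : ℕ, j < (chainLoop n k t w c).length →
        (((chainLoop n k t w c).getD j 0 : ℤ) : ZMod 1000000007) = cLM k j) ∧
    (∀ j : ℕ, (chainLoop n k t w c).length ≤ j → (j : ℤ) ≤ n - 1 → cLM k j = 0) := by
  intro fuel
  induction fuel with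
  | zero =>
    intro t w c hfuel ht _ _ _ hcv
    rw [chainLoop, dif_neg (fun h => by omega)]
    refine ⟨hcv, ?_⟩
    intro j hj hjn
    omega
  | succ fuel ihf =>
    intro t w c hfuel ht hwlen hwrange hwv hcv
    rw [chainLoop]
    by_cases hcond : t ≤ n ∧ w.any (fun x => !(x == 0))
    · rw [dif_pos hcond]
      have hwne : ∃ x ∈ w, x ≠ 0 := by
        obtain ⟨x, hx, hxb⟩ := List.any_eq_true.mp hcond.2
        exact ⟨x, hx, by simpa using hxb⟩
      have hk1 : 1 ≤ k := by
        obtain ⟨x, hx, -⟩ := hwne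
        have : w.length ≠ 0 := by
          intro h0
          rw [List.length_eq_zero_iff.mp h0] at hx
          simp at hx
        omega
      apply ihf (t+1) (nextW k w) (c ++ [PySem.Int.mod w.sum moduloB])
      · omega
      · rw [List.length_append, List.length_cons, List.length_nil]
        push_cast
        omega
      · exact nextW_length k w
      · exact nextW_range k w
      · intro m hm1 hmk
        rw [List.length_append, List.length_cons, List.length_nil]
        have : cvec (nextW k w) m = DapM k (cvec w) m := by
          simp only [cvec]
          exact nextW_getD k w hk1 hwlen m hm1 hmk
        rw [this, DapM_congr k _ _ hwv m, show c.length + (0 + 1) = c.length + 1 from by omega,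
            Function.iterate_succ_apply']
      · intro j hj
        rw [List.length_append, List.length_cons, List.length_nil] at hj
        rcases Nat.lt_or_ge j c.length with hlt | hge
        · rw [getD_snoc_lt c _ j hlt]
          exact hcv j hlt
        · have hjeq : j = c.length := by omega
          subst hjeq
          rw [getD_snoc_self]
          simp only [moduloB]
          rw [cast_pymod, listsum_totM k w hwlen, totM_congr k _ _ hwv]
          rfl
    · rw [dif_neg hcond]
      refine ⟨hcv, ?_⟩
      intro j hj hjn
      by_cases htn : t ≤ n
      · have hzero : ∀ x ∈ w, x = 0 := by
          intro x hx
          by_contra hne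
          exact hcond ⟨htn, List.any_eq_true.mpr ⟨x, hx, by simp [hne]⟩⟩
        have hv0 : ∀ m, 1 ≤ m → m ≤ k → (DapM k)^[c.length] onefM m = 0 := by
          intro m hm1 hmk
          rw [← hwv m hm1 hmk]
          simp only [cvec]
          have hidx : PySem.List.pyGetD w (m-1) 0 = 0 := by
            rw [PySem.List.pyGetD_eq_getElem _ _ (by omega) (by rw [hwlen]; omega)]
            exact hzero _ (List.getElem_mem _)
          rw [hidx]
          simp
        exact cLM_vanish k c.length hv0 j (by omega)
      · omega

-- the g loop: entries are the ZMod recurrence values, reduced into [0, modulo)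
def gAcc (c : List Int) (T : ℕ) : List Int :=
  (PySem.List.pyRange 1 ((T : ℤ) + 1) 1).foldl
    (fun g t => g ++ [PySem.Int.mod (gStep c g t) moduloB]) [1]

theorem gAcc_succ (c : List Int) (T : ℕ) :
    gAcc c (T+1) = gAcc c T ++ [PySem.Int.mod (gStep c (gAcc c T) ((T : ℤ) + 1)) moduloB] := by
  unfold gAcc
  have hc : ((T + 1 : ℕ) : ℤ) + 1 = ((T : ℤ) + 1) + 1 := by push_cast; ring
  rw [hc, PySem.List.pyRange_one_succ_right (by omega), List.foldl_append]
  rfl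

-- one pass of the g recurrence, cast to ZMod, is the inclusion-exclusion recurrence
theorem gStep_cast (n k : Int) (c g : List Int) (T : ℕ)
    (hg : g.length = T + 1)
    (hgc : ∀ j : ℕ, j ≤ T → ((g.getD j 0 : ℤ) : ZMod 1000000007) = gMf k j)
    (Hc1 : ∀ j : ℕ, j < c.length → ((c.getD j 0 : ℤ) : ZMod 1000000007) = cLM k j)
    (Hc2 : ∀ j : ℕ, c.length ≤ j → (j : ℤ) ≤ n - 1 → cLM k j = 0)
    (hT : ((T : ℤ) + 1) ≤ n) :
    ((gStep c g ((T : ℤ) + 1) : ℤ) : ZMod 1000000007) = gMf k (T+1) := by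
  have hfun : (fun (s L : ℤ) =>
      if PySem.Int.mod L 2 == 1 then
        s + PySem.List.pyGetD c (L-1) 0 * PySem.List.pyGetD g (((T : ℤ) + 1)-L) 0
      else
        s - PySem.List.pyGetD c (L-1) 0 * PySem.List.pyGetD g (((T : ℤ) + 1)-L) 0)
    = (fun (s L : ℤ) => s +
        (if PySem.Int.mod L 2 == 1 then
          PySem.List.pyGetD c (L-1) 0 * PySem.List.pyGetD g (((T : ℤ) + 1)-L) 0
        else
          -(PySem.List.pyGetD c (L-1) 0 * PySem.List.pyGetD g (((T : ℤ) + 1)-L) 0))) := by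
    funext s L
    split <;> ring
  rw [gStep, hfun, PySem.List.foldl_add, zero_add]
  rw [castZ_listsum, List.map_map, PySem.List.pyRange_one, List.map_map]
  set mv : ℤ := min ((T : ℤ) + 1) (c.length : ℤ) with hmv
  have hmv0 : 0 ≤ mv := by omega
  have hmvT : mv.toNat ≤ T + 1 := by omega
  rw [show (mv + 1 - 1).toNat = mv.toNat from by omega, list_range_sum]
  have hterm : ∀ i ∈ Finset.range mv.toNat,
      (((if PySem.Int.mod (1 + (i : ℤ)) 2 == 1 then
          PySem.List.pyGetD c ((1 + (i : ℤ))-1) 0 * PySem.List.pyGetD g (((T : ℤ) + 1)-(1 + (i : ℤ))) 0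
        else
          -(PySem.List.pyGetD c ((1 + (i : ℤ))-1) 0 * PySem.List.pyGetD g (((T : ℤ) + 1)-(1 + (i : ℤ))) 0)) : ℤ)
        : ZMod 1000000007)
      = coefM k T i * cLM k i := by
    intro i hi
    rw [Finset.mem_range] at hi
    have hic : i < c.length := by omega
    have hiT : i ≤ T := by omega
    have hidx1 : (1 + (i : ℤ)) - 1 = ((i : ℕ) : ℤ) := by omega
    have hidx2 : ((T : ℤ) + 1) - (1 + (i : ℤ)) = ((T - i : ℕ) : ℤ) := by push_cast; omega
    have hcv : ((PySem.List.pyGetD c ((1 + (i : ℤ))-1) 0 : ℤ) : ZMod 1000000007) = cLM k i := by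
      rw [hidx1, PySem.List.pyGetD_natCast]
      exact Hc1 i hic
    have hgv : ((PySem.List.pyGetD g (((T : ℤ) + 1)-(1 + (i : ℤ))) 0 : ℤ) : ZMod 1000000007)
        = gMf k (T - i) := by
      rw [hidx2, PySem.List.pyGetD_natCast]
      exact hgc (T - i) (by omega)
    rcases Nat.even_or_odd i with he | ho
    · have hmod : PySem.Int.mod (1 + (i : ℤ)) 2 = 1 := by
        obtain ⟨r, hr⟩ := he
        rw [PySem.Int.mod_eq_emod_of_pos (by norm_num)]
        subst hr
        push_cast
        omega
      rw [if_pos (by rw [hmod]; norm_num), Int.cast_mul, hcv, hgv, coefM, Even.neg_one_pow he]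
      ring
    · have hmod : PySem.Int.mod (1 + (i : ℤ)) 2 = 0 := by
        obtain ⟨r, hr⟩ := ho
        rw [PySem.Int.mod_eq_emod_of_pos (by norm_num)]
        subst hr
        push_cast
        omega
      rw [if_neg (by rw [hmod]; norm_num), Int.cast_neg, Int.cast_mul, hcv, hgv, coefM, Odd.neg_one_pow ho]
      ring
  simp only [Function.comp_apply]
  rw [Finset.sum_congr rfl hterm]
  have hsplit : ∑ i ∈ Finset.range (T+1), coefM k T i * cLM k i
      = ∑ i ∈ Finset.range mv.toNat, coefM k T i * cLM k i
        + ∑ i ∈ Finset.Ico mv.toNat (T+1), coefM k T i * cLM k i := by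
    rw [Finset.range_eq_Ico, ← Finset.sum_Ico_consecutive _ (Nat.zero_le _) hmvT,
        ← Finset.range_eq_Ico]
  have hzero : ∑ i ∈ Finset.Ico mv.toNat (T+1), coefM k T i * cLM k i = 0 := by
    apply Finset.sum_eq_zero
    intro i hi
    rw [Finset.mem_Ico] at hi
    have hge : c.length ≤ i := by omega
    rw [Hc2 i hge (by omega), mul_zero]
  rw [gM_rec, hsplit, hzero, add_zero]

theorem gAcc_spec (n k : Int) (c : List Int)
    (Hc1 : ∀ j : ℕ, j < c.length → ((c.getD j 0 : ℤ) : ZMod 1000000007) = cLM k j)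
    (Hc2 : ∀ j : ℕ, c.length ≤ j → (j : ℤ) ≤ n - 1 → cLM k j = 0) :
    ∀ T : ℕ, (T : ℤ) ≤ n →
      (gAcc c T).length = T + 1 ∧
      (∀ j : ℕ, j ≤ T → (((gAcc c T).getD j 0 : ℤ) : ZMod 1000000007) = gMf k j) ∧
      (∀ j : ℕ, j ≤ T → 0 ≤ (gAcc c T).getD j 0 ∧ (gAcc c T).getD j 0 < 1000000007) := by
  intro T
  induction T with
  | zero =>
    intro _
    have h0 : gAcc c 0 = [1] := by
      rw [gAcc, show ((0:ℕ):ℤ) + 1 = 1 from by norm_num,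
          PySem.List.pyRange_one_eq_nil (by omega), List.foldl_nil]
    rw [h0]
    refine ⟨rfl, ?_, ?_⟩
    · intro j hj
      interval_cases j
      simp [gMf]
    · intro j hj
      interval_cases j
      norm_num
  | succ T ihT =>
    intro hTn
    have hTn' : (T : ℤ) ≤ n := by push_cast at hTn ⊢; omega
    obtain ⟨ihlen, ihcast, ihrange⟩ := ihT hTn'
    have hkey : ((gStep c (gAcc c T) ((T : ℤ) + 1) : ℤ) : ZMod 1000000007) = gMf k (T+1) :=
      gStep_cast n k c (gAcc c T) T ihlen ihcast Hc1 Hc2 (by push_cast at hTn ⊢; omega)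
    rw [gAcc_succ]
    refine ⟨?_, ?_, ?_⟩
    · rw [List.length_append, ihlen]
      rfl
    · intro j hj
      rcases Nat.lt_or_ge j (T+1) with hlt | hge
      · rw [getD_snoc_lt _ _ j (by omega)]
        exact ihcast j (by omega)
      · have hjeq : j = T + 1 := by omega
        subst hjeq
        rw [show T + 1 = (gAcc c T).length from ihlen.symm, getD_snoc_self, ihlen]
        simp only [moduloB]
        rw [cast_pymod]
        exact hkey
    · intro j hj
      rcases Nat.lt_or_ge j (T+1) with hlt | hge
      · rw [getD_snoc_lt _ _ j (by omega)]
        exact ihrange j (by omega)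
      · have hjeq : j = T + 1 := by omega
        subst hjeq
        rw [show T + 1 = (gAcc c T).length from ihlen.symm, getD_snoc_self]
        exact ⟨PySem.Int.mod_nonneg _ (by norm_num [moduloB]),
               PySem.Int.mod_lt _ (by norm_num [moduloB])⟩

-- ===== VERDICT (by name: the statement is the Claim_ definition above) =====
theorem count_spec : Claim_equal_count := by
  unfold Claim_equal_count Spec_count Pre_count
  intro n k _ hn
  -- A side: bounds and cast value
  have hA := countA_eq n k hn
  have hAbounds : 0 ≤ count n k ∧ count n k < 1000000007 := by
    rw [hA]
    exact ⟨PySem.Int.mod_nonneg _ (by norm_num), PySem.Int.mod_lt _ (by norm_num)⟩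
  have hAcast : ((count n k : ℤ) : ZMod 1000000007) = gMf k n.toNat := by
    rw [hA, cast_pymod]
    rcases le_or_gt 0 k with hk | hk
    · rw [listsum_totM k _ (curB_inv k hk (n-1).toNat).1,
          totM_congr k _ _ (AInv k (n-1).toNat)]
      rw [show n.toNat = (n-1).toNat + 1 from by omega]
      rfl
    · have hinit : List.replicate k.toNat (1:Int) = [] := by
        rw [show k.toNat = 0 from by omega, List.replicate_zero]
      have hstepnil : countStep k ([] : List Int) = [] := by
        have := countStep_length k ([] : List Int)
        rw [show k.toNat = 0 from by omega] at this
        exact List.length_eq_zero_iff.mp this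
      rw [hinit, Function.iterate_fixed (f := countStep k) (x := ([] : List Int)) hstepnil _]
      have hg0 : gMf k n.toNat = 0 := by
        rw [show n.toNat = (n.toNat - 1) + 1 from by omega]
        show totM k _ = 0
        rw [totM, show k.toNat = 0 from by omega]
        simp
      rw [hg0]
      simp
  -- B side: run the chain loop and the g loop specifications
  set w0 : List Int := if 0 < k then List.replicate k.toNat (1:Int) else [] with hw0
  have hw0len : w0.length = k.toNat := by
    rw [hw0]
    by_cases hk0 : 0 < k
    · rw [if_pos hk0, List.length_replicate]
    · rw [if_neg hk0]
      simp
      omega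
  have hw0r : ∀ x ∈ w0, 0 ≤ x ∧ x < 1000000007 := by
    intro x hx
    rw [hw0] at hx
    split at hx
    · rw [List.eq_of_mem_replicate hx]
      norm_num
    · simp at hx
  have hw0v : ∀ m, 1 ≤ m → m ≤ k → cvec w0 m = (DapM k)^[([] : List Int).length] onefM m := by
    intro m hm1 hmk
    rw [hw0, if_pos (by omega)]
    simp only [cvec, List.length_nil, Function.iterate_zero_apply]
    rw [pyGetD_replicate _ _ _ _ (by omega) (by omega)]
    simp [onefM]
  have hCspec := chainLoop_spec n k n.toNat 1 w0 []
    (by omega) (by simp) hw0len hw0r hw0v (fun j hj => absurd hj (by simp))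
  obtain ⟨HC1, HC2⟩ := hCspec
  set C := chainLoop n k 1 w0 [] with hC
  have hB : count_alt n k = PySem.List.pyGetD (gAcc C n.toNat) n 0 := by
    simp only [count_alt, gAcc, hC, hw0]
    rw [show ((n.toNat : ℕ) : ℤ) = n from by omega]
  obtain ⟨hglen, hgcast, hgrange⟩ := gAcc_spec n k C HC1 HC2 n.toNat (by omega)
  have hidx : PySem.List.pyGetD (gAcc C n.toNat) n 0 = (gAcc C n.toNat).getD n.toNat 0 := by
    rw [PySem.List.pyGetD_of_nonneg _ _ (by omega)]
  have hBcast : ((count_alt n k : ℤ) : ZMod 1000000007) = gMf k n.toNat := by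
    rw [hB, hidx]
    exact hgcast n.toNat (le_refl _)
  have hBbounds : 0 ≤ count_alt n k ∧ count_alt n k < 1000000007 := by
    rw [hB, hidx]
    exact hgrange n.toNat (le_refl _)
  exact int_eq_of_cast _ _ hAbounds.1 hAbounds.2 hBbounds.1 hBbounds.2
    (hAcast.trans hBcast.symm)
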